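-- pv_equiv track=rewrite | github.com/529324416/BugCollector | gdt_database/_utils.py | handle_pages
-- ===== SOURCE A (Python) =====
-- from typing import List, Dict, Any
--
-- def calc_page_count(total_count:int, page_count:int) -> int:
--     '''计算总页数'''
--
--     if total_count == 0:
--         return 0
--     if total_count % page_count == 0:
--         return total_count // page_count
--     return total_count // page_count + 1
--
-- def handle_pages(total_count:int, page_count:int, current_page:int, page_range=2) -> List[int]:
--     '''获取分页列表，以当前页为中心，左右各取page_range页'''
--
--     if total_count == 0:
--         return []
--
--     _page_count = calc_page_count(total_count, page_count)
--     if _page_count <= 1: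
--         return [1]
--
--     if current_page < 1:
--         current_page = 1
--     elif current_page > _page_count:
--         current_page = _page_count
--
--     _pages = [current_page]
--     for i in range(1, page_range + 1):
--         if current_page - i > 0:
--             _pages.insert(0, current_page - i)
--         if current_page + i <= _page_count:
--             _pages.append(current_page + i)
--
--     return _pages
-- ===== SOURCE B (Python) =====
-- def handle_pages(total_count, page_count, current_page, page_range=2):
--     '''Closed form: the page window is one contiguous range around the clamped current page.'''
--     if total_count == 0:
--         return []
--     pages = -(-total_count // page_count)  # ceiling division
--     if pages <= 1:
--         return [1]
--     cur = min(max(current_page, 1), pages)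
--     span = max(page_range, 0)
--     return list(range(max(1, cur - span), min(pages, cur + span) + 1))
-- ===== Notes on version B (the rewrite author's own statement) =====
-- stated objective: simpler
-- what changed: Replaces the insert/append loop that grows the page list item by item with a closed-form contiguous range [max(1, cur-span), min(pages, cur+span)] and ceiling division instead of the remainder-test helper.
import Mathlib
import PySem

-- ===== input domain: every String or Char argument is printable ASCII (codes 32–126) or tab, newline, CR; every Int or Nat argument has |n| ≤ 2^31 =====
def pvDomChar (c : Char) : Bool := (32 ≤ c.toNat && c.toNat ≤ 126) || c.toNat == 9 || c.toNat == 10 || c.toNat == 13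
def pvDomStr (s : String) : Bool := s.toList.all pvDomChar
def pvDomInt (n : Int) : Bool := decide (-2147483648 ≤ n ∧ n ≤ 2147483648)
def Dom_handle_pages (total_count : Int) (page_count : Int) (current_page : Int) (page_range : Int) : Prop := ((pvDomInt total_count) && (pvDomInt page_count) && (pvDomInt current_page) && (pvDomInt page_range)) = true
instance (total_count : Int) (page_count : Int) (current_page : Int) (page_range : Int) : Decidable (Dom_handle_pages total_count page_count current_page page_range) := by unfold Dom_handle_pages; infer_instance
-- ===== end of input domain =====

-- B replaces the element-by-element insert/append loop by a closed-form contiguous range; objective: simpler.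

-- ===== PORT A =====
def calc_page_count (total_count : Int) (page_count : Int) : Int :=
  if total_count = 0 then 0
  else if PySem.Int.mod total_count page_count = 0 then PySem.Int.floordiv total_count page_count
  else PySem.Int.floordiv total_count page_count + 1

def handle_pages (total_count : Int) (page_count : Int) (current_page : Int) (page_range : Int) : List Int :=
  if total_count = 0 then []
  else
    let _page_count := calc_page_count total_count page_count
    if _page_count ≤ 1 then [1]
    else
      let current_page := if current_page < 1 then 1
                          else if current_page > _page_count then _page_count
                          else current_page
      (PySem.List.pyRange 1 (page_range + 1) 1).foldl
        (fun _pages i =>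
          let _pages := if current_page - i > 0 then (current_page - i) :: _pages else _pages
          if current_page + i ≤ _page_count then _pages ++ [current_page + i] else _pages)
        [current_page]

-- ===== PORT B =====
def handle_pages_alt (total_count : Int) (page_count : Int) (current_page : Int) (page_range : Int) : List Int :=
  if total_count = 0 then []
  else
    let pages := -(PySem.Int.floordiv (-total_count) page_count)
    if pages ≤ 1 then [1]
    else
      let cur := min (max current_page 1) pages
      let span := max page_range 0
      PySem.List.pyRange (max 1 (cur - span)) (min pages (cur + span) + 1) 1

-- ===== PRECONDITION & SPEC =====
-- Pre_ excludes only page_count = 0 (with total_count ≠ 0), where Python A raises ZeroDivisionError.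
def Pre_handle_pages (total_count : Int) (page_count : Int) (current_page : Int) (page_range : Int) : Prop :=
  total_count = 0 ∨ page_count ≠ 0
instance (total_count : Int) (page_count : Int) (current_page : Int) (page_range : Int) : Decidable (Pre_handle_pages total_count page_count current_page page_range) := by unfold Pre_handle_pages; infer_instance
def pvWitness_handle_pages : Int × Int × Int × Int := (95, 10, 4, 2)

def Spec_handle_pages (total_count : Int) (page_count : Int) (current_page : Int) (page_range : Int) (out : List Int) : Prop := out = handle_pages_alt total_count page_count current_page page_range
instance (total_count : Int) (page_count : Int) (current_page : Int) (page_range : Int) (out : List Int) : Decidable (Spec_handle_pages total_count page_count current_page page_range out) := by unfold Spec_handle_pages; infer_instance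

-- ===== CLAIM (what is proved, stated in full; the proofs are below) =====
def Claim_equal_handle_pages : Prop := ∀ (total_count : Int) (page_count : Int) (current_page : Int) (page_range : Int), Dom_handle_pages total_count page_count current_page page_range → Pre_handle_pages total_count page_count current_page page_range → Spec_handle_pages total_count page_count current_page page_range (handle_pages total_count page_count current_page page_range)

-- ===== LEMMAS AND PROOFS =====

-- A's remainder-test page count equals B's ceiling division, for nonzero arguments.
theorem calc_eq_ceil (t p : Int) (ht : t ≠ 0) (hp : p ≠ 0) :
    calc_page_count t p = -(PySem.Int.floordiv (-t) p) := by
  have e1 := PySem.Int.floordiv_mul_add_mod t p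
  unfold calc_page_count
  rw [if_neg ht]
  rcases lt_or_gt_of_ne hp with hneg | hpos
  · have b1 := PySem.Int.mod_neg_bounds t hneg
    have b2 := PySem.Int.mod_neg_bounds (-t) hneg
    have e2 := PySem.Int.floordiv_mul_add_mod (-t) p
    set fq := PySem.Int.floordiv t p with hfq
    set r := PySem.Int.mod t p with hr
    set q' := PySem.Int.floordiv (-t) p with hq'
    set r' := PySem.Int.mod (-t) p with hr'
    have hsum : (fq + q') * p + (r + r') = 0 := by linear_combination e1 + e2
    have hs : fq + q' = 0 ∨ fq + q' = -1 := by
      by_contra h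
      push Not at h
      have h2 : fq + q' ≤ -2 ∨ 1 ≤ fq + q' := by omega
      rcases h2 with h2 | h2
      · have := mul_le_mul_of_nonpos_right h2 (le_of_lt hneg)
        linarith
      · have := mul_le_mul_of_nonpos_right h2 (le_of_lt hneg)
        linarith
    rcases hs with hs | hs <;> rw [hs] at hsum <;> split_ifs with hr0 <;> omega
  · have b1 := PySem.Int.mod_nonneg t hpos
    have b2 := PySem.Int.mod_lt t hpos
    symm
    rw [PySem.Int.neg_floordiv_neg_eq_iff_of_pos hpos]
    set fq := PySem.Int.floordiv t p with hfq
    set r := PySem.Int.mod t p with hr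
    have ha : (fq - 1) * p = fq * p - p := by ring
    have hb : (fq + 1 - 1) * p = fq * p := by ring
    have hc : (fq + 1) * p = fq * p + p := by ring
    split_ifs with hr0
    · constructor <;> linarith
    · have hrpos : 0 < r := lt_of_le_of_ne b1 (Ne.symm hr0)
      constructor
      · rw [hb]; linarith
      · rw [hc]; linarith

-- A's insert/append loop builds exactly the contiguous range B computes in closed form.
theorem loop_closed (pc cp : Int) (h1 : 1 ≤ cp) (h2 : cp ≤ pc) : ∀ k : Nat,
    (PySem.List.pyRange 1 (1 + (k : Int)) 1).foldl
      (fun _pages i =>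
        let _pages := if cp - i > 0 then (cp - i) :: _pages else _pages
        if cp + i ≤ pc then _pages ++ [cp + i] else _pages)
      [cp]
    = PySem.List.pyRange (max 1 (cp - (k : Int))) (min pc (cp + (k : Int)) + 1) 1 := by
  intro k
  induction k with
  | zero =>
    rw [show ((0:Nat):Int) = 0 by rfl]
    rw [show (1:Int) + 0 = 1 by ring, PySem.List.pyRange_one_eq_nil le_rfl]
    rw [show max 1 (cp - 0) = cp by omega, show min pc (cp + 0) = cp by omega]
    rw [PySem.List.pyRange_one_singleton]
    rfl
  | succ k ih =>
    have hcast : ((k+1 : Nat) : Int) = (k : Int) + 1 := by push_cast; ring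
    rw [hcast, show (1:Int) + ((k:Int) + 1) = (1 + (k:Int)) + 1 by ring]
    rw [PySem.List.pyRange_one_succ_right (by omega : (1:Int) ≤ 1 + (k:Int))]
    rw [List.foldl_append, ih]
    simp only [List.foldl_cons, List.foldl_nil]
    set L := max 1 (cp - (k : Int)) with hL
    set H := min pc (cp + (k : Int)) with hH
    have hLcp : L ≤ cp := by omega
    have hcpH : cp ≤ H := by omega
    by_cases hlo : cp - (1 + (k:Int)) > 0
    · rw [if_pos hlo]
      have hLeq : L = cp - (1 + (k:Int)) + 1 := by omega
      have hcons : PySem.List.pyRange (cp - (1 + (k:Int))) (H + 1) 1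
          = (cp - (1 + (k:Int))) :: PySem.List.pyRange (cp - (1 + (k:Int)) + 1) (H + 1) 1 :=
        PySem.List.pyRange_one_cons (by omega)
      rw [hLeq, ← hcons]
      have hmax : max 1 (cp - ((k:Int) + 1)) = cp - (1 + (k:Int)) := by omega
      rw [hmax]
      by_cases hhi : cp + (1 + (k:Int)) ≤ pc
      · rw [if_pos hhi]
        have hHeq : H + 1 = cp + (1 + (k:Int)) := by omega
        rw [show min pc (cp + ((k:Int) + 1)) = H + 1 by omega]
        rw [PySem.List.pyRange_one_succ_right (by omega : cp - (1 + (k:Int)) ≤ H + 1), hHeq]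
      · rw [if_neg hhi]
        rw [show min pc (cp + ((k:Int) + 1)) = H by omega]
    · rw [if_neg hlo]
      have hmax : max 1 (cp - ((k:Int) + 1)) = L := by omega
      rw [hmax]
      by_cases hhi : cp + (1 + (k:Int)) ≤ pc
      · rw [if_pos hhi]
        have hHeq : H + 1 = cp + (1 + (k:Int)) := by omega
        rw [show min pc (cp + ((k:Int) + 1)) = H + 1 by omega]
        rw [PySem.List.pyRange_one_succ_right (by omega : L ≤ H + 1), hHeq]
      · rw [if_neg hhi]
        rw [show min pc (cp + ((k:Int) + 1)) = H by omega]

-- ===== VERDICT (by name: the statement is the Claim_ definition above) =====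
theorem handle_pages_spec : Claim_equal_handle_pages := by
  intro t p c r _ hpre
  unfold Spec_handle_pages handle_pages handle_pages_alt
  by_cases ht : t = 0
  · simp only [if_pos ht]
  · have hp : p ≠ 0 := hpre.resolve_left ht
    simp only [if_neg ht]
    rw [calc_eq_ceil t p ht hp]
    set pc := -(PySem.Int.floordiv (-t) p) with hpc
    by_cases hle : pc ≤ 1
    · simp only [if_pos hle]
    · simp only [if_neg hle]
      have hpc2 : 2 ≤ pc := by omega
      have hcp : (if c < 1 then 1 else if c > pc then pc else c) = min (max c 1) pc := by
        split_ifs <;> omega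
      rw [hcp]
      set cp := min (max c 1) pc with hcpdef
      have h1 : 1 ≤ cp := by omega
      have h2 : cp ≤ pc := by omega
      by_cases hr : r ≤ 0
      · rw [PySem.List.pyRange_one_eq_nil (by omega : r + 1 ≤ 1)]
        rw [show max r 0 = 0 by omega]
        rw [show max 1 (cp - 0) = cp by omega, show min pc (cp + 0) = cp by omega]
        rw [PySem.List.pyRange_one_singleton]
        rfl
      · rw [show max r 0 = r by omega]
        rw [show r + 1 = 1 + ((r.toNat : Nat) : Int) by omega]
        rw [show cp - r = cp - ((r.toNat : Nat) : Int) by omega,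
            show cp + r = cp + ((r.toNat : Nat) : Int) by omega]
        exact loop_closed pc cp h1 h2 r.toNat
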